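-- pv_equiv track=rewrite | github.com/fioridaniel/CS50AI | week1/minesweeper/test.py | adjacentCells
-- ===== SOURCE A (Python) =====
-- def adjacentCells(cell):
--     """ returns the set of adjacent cells (i, j) for cell """
--     adj_cells = set()
--     i, j = cell
--
--     for row in range(8):
--         for col in range(8):
--
--             adj_cell = row, col
--             delta_row = abs(i - row)
--             delta_col = abs(j - col)
--
--             # mesma linha
--             if delta_row == 0 and delta_col == 1:
--                 adj_cells.add(adj_cell)
--
--             # mesma coluna
--             elif delta_row == 1 and delta_col == 0:
--                 adj_cells.add(adj_cell)
--
--             # diagonal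
--             elif delta_row == 1 and delta_col == 1:
--                 adj_cells.add(adj_cell)
--
--     return adj_cells
-- ===== SOURCE B (Python) =====
-- def adjacentCells(cell):
--     """ returns the set of adjacent cells (i, j) for cell """
--     adj_cells = set()
--     i, j = cell
--     for dr in (-1, 0, 1):
--         for dc in (-1, 0, 1):
--             if dr == 0 and dc == 0:
--                 continue
--             r = i + dr
--             c = j + dc
--             if 0 <= r < 8 and 0 <= c < 8:
--                 adj_cells.add((r, c))
--     return adj_cells
-- ===== Notes on version B (the rewrite author's own statement) =====
-- stated objective: idiomatic
-- what changed: B enumerates the at most 8 candidate neighbours via (dr,dc) offsets and bound-checks each, instead of scanning all 64 board cells and testing abs-delta conditions.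
import Mathlib
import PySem

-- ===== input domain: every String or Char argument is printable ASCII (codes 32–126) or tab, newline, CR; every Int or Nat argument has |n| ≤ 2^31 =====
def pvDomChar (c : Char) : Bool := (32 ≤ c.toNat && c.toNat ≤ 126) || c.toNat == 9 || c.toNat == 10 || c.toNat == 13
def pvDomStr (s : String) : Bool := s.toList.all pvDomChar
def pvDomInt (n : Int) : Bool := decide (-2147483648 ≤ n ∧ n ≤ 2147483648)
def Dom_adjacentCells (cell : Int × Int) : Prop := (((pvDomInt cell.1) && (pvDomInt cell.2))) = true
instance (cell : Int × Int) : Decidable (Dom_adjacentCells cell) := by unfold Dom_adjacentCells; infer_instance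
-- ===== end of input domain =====

-- B enumerates the 8 neighbour offsets and bound-checks each instead of scanning all 64 board cells (more idiomatic).

-- ===== PORT A =====
def adjacentCells (cell : Int × Int) : List (Int × Int) :=
  let i := cell.1
  let j := cell.2
  (PySem.List.pyRange 0 8 1).foldl (fun s row =>
    (PySem.List.pyRange 0 8 1).foldl (fun s col =>
      let delta_row := (i - row).natAbs
      let delta_col := (j - col).natAbs
      if delta_row = 0 ∧ delta_col = 1 then PySem.Set.add s (row, col)
      else if delta_row = 1 ∧ delta_col = 0 then PySem.Set.add s (row, col)
      else if delta_row = 1 ∧ delta_col = 1 then PySem.Set.add s (row, col)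
      else s) s) PySem.Set.empty

-- ===== PORT B =====
def adjacentCells_alt (cell : Int × Int) : List (Int × Int) :=
  let i := cell.1
  let j := cell.2
  (([-1, 0, 1] : List Int).flatMap (fun dr => ([-1, 0, 1] : List Int).map (fun dc => (dr, dc)))).foldl
    (fun s d =>
      if d.1 = 0 ∧ d.2 = 0 then s
      else
        let r := i + d.1
        let c := j + d.2
        if 0 ≤ r ∧ r < 8 ∧ 0 ≤ c ∧ c < 8 then PySem.Set.add s (r, c) else s)
    PySem.Set.empty

-- ===== PRECONDITION & SPEC =====
def Spec_adjacentCells (cell : Int × Int) (out : List (Int × Int)) : Prop := out = adjacentCells_alt cell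
instance (cell : Int × Int) (out : List (Int × Int)) : Decidable (Spec_adjacentCells cell out) := by unfold Spec_adjacentCells; infer_instance

-- ===== CLAIM (what is proved, stated in full; the proofs are below) =====
def Claim_equal_adjacentCells : Prop := ∀ (cell : Int × Int), Dom_adjacentCells cell → Spec_adjacentCells cell (adjacentCells cell)

-- ===== LEMMAS AND PROOFS =====

theorem pv_foldl_id {α β : Type} (f : α → β → α) (l : List β)
    (h : ∀ x ∈ l, ∀ t, f t x = t) : ∀ s, l.foldl f s = s := by
  induction l with
  | nil => intro s; rfl
  | cons a l ih =>
      intro s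
      rw [List.foldl_cons, h a (List.mem_cons_self ..),
        ih (fun x hx t => h x (List.mem_cons_of_mem _ hx) t)]

theorem pv_pyRange8 : PySem.List.pyRange 0 8 1 = [0, 1, 2, 3, 4, 5, 6, 7] := by decide

theorem pv_A_out (i j : Int) (h : i ≤ -2 ∨ 9 ≤ i ∨ j ≤ -2 ∨ 9 ≤ j) :
    adjacentCells (i, j) = [] := by
  unfold adjacentCells
  rw [pv_pyRange8]
  apply pv_foldl_id
  intro row hrow t
  apply pv_foldl_id
  intro col hcol t'
  fin_cases hrow <;> fin_cases hcol <;> dsimp only <;> split_ifs <;> first | rfl | omega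

theorem pv_B_out (i j : Int) (h : i ≤ -2 ∨ 9 ≤ i ∨ j ≤ -2 ∨ 9 ≤ j) :
    adjacentCells_alt (i, j) = [] := by
  unfold adjacentCells_alt
  apply pv_foldl_id
  intro d hd t
  fin_cases hd <;> simp only [true_and, and_true] <;> split_ifs <;> first | rfl | omega

theorem pv_eq (i j : Int) : adjacentCells (i, j) = adjacentCells_alt (i, j) := by
  by_cases hi : -1 ≤ i ∧ i ≤ 8
  · by_cases hj : -1 ≤ j ∧ j ≤ 8
    · obtain ⟨h1, h2⟩ := hi
      obtain ⟨h3, h4⟩ := hj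
      interval_cases i <;> interval_cases j <;> decide
    · rw [pv_A_out i j (by omega), pv_B_out i j (by omega)]
  · rw [pv_A_out i j (by omega), pv_B_out i j (by omega)]

-- ===== VERDICT (by name: the statement is the Claim_ definition above) =====
theorem adjacentCells_spec : Claim_equal_adjacentCells := by
  intro cell _
  unfold Spec_adjacentCells
  exact pv_eq cell.1 cell.2
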